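-- pv_equiv track=rewrite | github.com/robertmonroe/shakespeare-ai | src/libriscribe/agents/outliner.py | _update_outline_markdown
-- ===== SOURCE A (Python) =====
-- def _update_outline_markdown(original_outline: str, max_chapters: int) -> str:
--     """Update the markdown outline to include only the specified number of chapters."""
--     lines = original_outline.split("\n")
--     updated_lines = []
--
--     in_chapter_section = False
--     current_chapter = 0
--
--     for line in lines:
--         # Look for chapter headers
--         if "Chapter" in line and ("**Chapter" in line or "## Chapter" in line):
--             in_chapter_section = True
--             current_chapter += 1
--
--             if current_chapter > max_chapters:
--                 # Skip this chapter and all content until we find another chapter or end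
--                 continue
--
--         # If we're not in a chapter we need to skip, add the line
--         if not in_chapter_section or current_chapter <= max_chapters:
--             updated_lines.append(line)
--
--     return "\n".join(updated_lines)
-- ===== SOURCE B (Python) =====
-- def _is_chapter_header(line):
--     return "Chapter" in line and ("**Chapter" in line or "## Chapter" in line)
--
--
-- def _update_outline_markdown(original_outline: str, max_chapters: int) -> str:
--     """Split the outline into a preamble block and one block per chapter, then keep
--     the preamble plus the first max_chapters chapter blocks."""
--     blocks = [[]]
--     for line in original_outline.split("\n"):
--         if _is_chapter_header(line):
--             blocks.append([])
--         blocks[-1].append(line)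
--     kept = blocks[:1] + blocks[1 : 1 + max(0, max_chapters)]
--     return "\n".join(line for block in kept for line in block)
-- ===== Notes on version B (the rewrite author's own statement) =====
-- stated objective: alternative
-- what changed: Replaces A's stateful line filter (in_chapter_section flag plus running chapter counter deciding append-or-skip per line) with a parse-into-blocks-then-slice structure: one pass groups the lines into a preamble block and per-chapter blocks, then the result is the preamble plus the first max(0, max_chapters) chapter blocks, flattened and joined.
import Mathlib
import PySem

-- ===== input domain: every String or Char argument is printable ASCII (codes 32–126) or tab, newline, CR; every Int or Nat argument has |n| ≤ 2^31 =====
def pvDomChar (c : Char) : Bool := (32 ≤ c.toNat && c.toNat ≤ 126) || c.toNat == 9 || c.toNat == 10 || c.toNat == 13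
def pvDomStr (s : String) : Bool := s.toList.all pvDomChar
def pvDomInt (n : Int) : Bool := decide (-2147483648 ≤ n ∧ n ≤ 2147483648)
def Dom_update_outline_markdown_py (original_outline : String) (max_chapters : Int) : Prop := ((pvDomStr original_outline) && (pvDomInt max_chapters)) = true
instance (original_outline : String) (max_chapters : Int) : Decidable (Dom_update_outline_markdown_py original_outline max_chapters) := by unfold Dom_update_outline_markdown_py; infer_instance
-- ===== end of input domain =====

-- B restructures A's stateful append-or-skip line filter into parse-into-blocks-then-slice; same cost, equal output (alternative decomposition).

-- ===== PORT A =====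
-- the header test '"Chapter" in line and ("**Chapter" in line or "## Chapter" in line)' (shared by both Pythons)
def pvIsHeader (line : List Char) : Bool :=
  PySem.Chars.isIn "Chapter".toList line &&
    (PySem.Chars.isIn "**Chapter".toList line || PySem.Chars.isIn "## Chapter".toList line)

-- A's for-loop: state (in_chapter_section, current_chapter), emitting updated_lines
def pvGoA (maxc : Int) : List (List Char) → Bool → Int → List (List Char)
  | [], _, _ => []
  | l :: rest, inSec, cur =>
    if pvIsHeader l then
      -- current_chapter += 1; skip (continue) when it exceeds max_chapters
      if maxc < cur + 1 then pvGoA maxc rest true (cur + 1)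
      else l :: pvGoA maxc rest true (cur + 1)
    else
      if !inSec || cur ≤ maxc then l :: pvGoA maxc rest inSec cur
      else pvGoA maxc rest inSec cur

def update_outline_markdown_py (original_outline : String) (max_chapters : Int) : String :=
  String.ofList (PySem.Chars.join "\n".toList
    (pvGoA max_chapters (PySem.Chars.splitOn original_outline.toList "\n".toList) false 0))

-- ===== PORT B =====
-- B's loop body: blocks.append([]) on a header, then blocks[-1].append(line)
def pvStepB (bs : List (List (List Char))) (l : List Char) : List (List (List Char)) :=
  let bs' := if pvIsHeader l then bs ++ [[]] else bs
  bs'.dropLast ++ [bs'.getLastD [] ++ [l]]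

def update_outline_markdown_py_alt (original_outline : String) (max_chapters : Int) : String :=
  let lines := PySem.Chars.splitOn original_outline.toList "\n".toList
  let blocks := lines.foldl pvStepB [[]]
  let kept := PySem.List.slice blocks none (some 1) ++
              PySem.List.slice blocks (some 1) (some (1 + max 0 max_chapters))
  String.ofList (PySem.Chars.join "\n".toList kept.flatten)

-- ===== PRECONDITION & SPEC =====
def Spec_update_outline_markdown_py (original_outline : String) (max_chapters : Int) (out : String) : Prop := out = update_outline_markdown_py_alt original_outline max_chapters
instance (original_outline : String) (max_chapters : Int) (out : String) : Decidable (Spec_update_outline_markdown_py original_outline max_chapters out) := by unfold Spec_update_outline_markdown_py; infer_instance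

-- ===== CLAIM (what is proved, stated in full; the proofs are below) =====
def Claim_equal_update_outline_markdown_py : Prop := ∀ (original_outline : String) (max_chapters : Int), Dom_update_outline_markdown_py original_outline max_chapters → Spec_update_outline_markdown_py original_outline max_chapters (update_outline_markdown_py original_outline max_chapters)

-- ===== LEMMAS AND PROOFS =====

-- reference decomposition: (preamble block, chapter blocks)
def pvParse : List (List Char) → List (List Char) × List (List (List Char))
  | [] => ([], [])
  | l :: rest =>
    let p := pvParse rest
    if pvIsHeader l then ([], (l :: p.1) :: p.2) else (l :: p.1, p.2)

lemma pvFoldl_step (lines : List (List Char)) :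
    ∀ (bs0 : List (List (List Char))) (b : List (List Char)),
      List.foldl pvStepB (bs0 ++ [b]) lines
        = bs0 ++ ((b ++ (pvParse lines).1) :: (pvParse lines).2) := by
  induction lines with
  | nil => intro bs0 b; simp [pvParse]
  | cons l rest ih =>
    intro bs0 b
    by_cases h : pvIsHeader l
    · have hstep : pvStepB (bs0 ++ [b]) l = (bs0 ++ [b]) ++ [[l]] := by
        simp [pvStepB, h]
      simp only [List.foldl_cons, hstep, ih (bs0 ++ [b]) [l], pvParse, h]
      simp
    · have hstep : pvStepB (bs0 ++ [b]) l = bs0 ++ [b ++ [l]] := by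
        simp [pvStepB, h]
      simp only [List.foldl_cons, hstep, ih bs0 (b ++ [l]), pvParse, h]
      simp

lemma pvGoA_skip (maxc : Int) (lines : List (List Char)) :
    ∀ cur : Int, maxc < cur → pvGoA maxc lines true cur = [] := by
  induction lines with
  | nil => intro cur _; simp [pvGoA]
  | cons l rest ih =>
    intro cur hcur
    by_cases h : pvIsHeader l
    · simp only [pvGoA, h, if_true]
      rw [if_pos (by omega : maxc < cur + 1)]
      exact ih (cur + 1) (by omega)
    · simp only [pvGoA, h, Bool.not_true, Bool.false_or, decide_eq_true_eq,
        Bool.false_eq_true, if_false]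
      rw [if_neg (by omega : ¬ cur ≤ maxc)]
      exact ih cur hcur

lemma pvGoA_true (maxc : Int) (lines : List (List Char)) :
    ∀ cur : Int, cur ≤ maxc →
      pvGoA maxc lines true cur
        = (pvParse lines).1 ++ (List.take (maxc - cur).toNat (pvParse lines).2).flatten := by
  induction lines with
  | nil => intro cur _; simp [pvGoA, pvParse]
  | cons l rest ih =>
    intro cur hcur
    by_cases h : pvIsHeader l
    · by_cases hm : maxc < cur + 1
      · have hskip := pvGoA_skip maxc rest (cur + 1) (by omega)
        have h0 : (maxc - cur).toNat = 0 := by omega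
        simp only [pvGoA, h, if_true]
        rw [if_pos hm, hskip]
        simp [pvParse, h, h0]
      · have h1 : (maxc - cur).toNat = (maxc - (cur + 1)).toNat + 1 := by omega
        simp only [pvGoA, h, if_true]
        rw [if_neg hm, ih (cur + 1) (by omega)]
        simp only [pvParse, h, if_true]
        rw [h1, List.take_succ_cons]
        simp
    · simp only [pvGoA, h, Bool.not_true, Bool.false_or, decide_eq_true_eq,
        Bool.false_eq_true, if_false]
      rw [if_pos hcur, ih cur hcur]
      simp [pvParse, h]

lemma pvGoA_false (maxc : Int) (lines : List (List Char)) :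
    pvGoA maxc lines false 0
      = (pvParse lines).1 ++ (List.take maxc.toNat (pvParse lines).2).flatten := by
  induction lines with
  | nil => simp [pvGoA, pvParse]
  | cons l rest ih =>
    by_cases h : pvIsHeader l
    · by_cases hm : maxc < 1
      · have hskip := pvGoA_skip maxc rest 1 (by omega)
        have h0 : maxc.toNat = 0 := by omega
        simp only [pvGoA, h, if_true]
        rw [if_pos (by omega : maxc < 0 + 1), show (0 : Int) + 1 = 1 by ring, hskip]
        simp [pvParse, h, h0]
      · have h1 : maxc.toNat = (maxc - 1).toNat + 1 := by omega
        simp only [pvGoA, h, if_true]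
        rw [if_neg (by omega : ¬ maxc < 0 + 1), show (0 : Int) + 1 = 1 by ring,
          pvGoA_true maxc rest 1 (by omega)]
        simp only [pvParse, h, if_true]
        rw [h1, List.take_succ_cons]
        simp
    · simp only [pvGoA, h, Bool.not_false, Bool.true_or, if_true]
      rw [ih]
      simp [pvParse, h]

-- ===== VERDICT (by name: the statement is the Claim_ definition above) =====
theorem update_outline_markdown_py_spec : Claim_equal_update_outline_markdown_py := by
  intro s maxc _
  unfold Spec_update_outline_markdown_py
  simp only [update_outline_markdown_py, update_outline_markdown_py_alt]
  have hblocks := pvFoldl_step (PySem.Chars.splitOn s.toList "\n".toList) [] []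
  simp only [List.nil_append] at hblocks
  rw [hblocks, pvGoA_false,
    PySem.List.slice_to _ (by omega : (0:Int) ≤ 1),
    PySem.List.slice_toNat _ (by omega : (0:Int) ≤ 1) (by omega : (0:Int) ≤ 1 + max 0 maxc)]
  have h2 : ((1 + max 0 maxc).toNat - 1) = maxc.toNat := by omega
  simp [h2]
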